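-- pv_equiv track=rewrite | github.com/AlexanderDLe/Python_DataStructuresAndAlgorithms | Amazon/PlatesBetweenCandles.py | buildNearestLeftCandle
-- ===== SOURCE A (Python) =====
-- def buildNearestLeftCandle(s, n):
--   left  = [-1] * n
--   count = -1
--
--   for i in range(n):
--     if s[i] == '|':
--       count = i
--       left[i] = count
--     else:
--       left[i] = count
--
--   return left
-- ===== SOURCE B (Python) =====
-- def buildNearestLeftCandle(s, n):
--   # Index the candle positions first, then fill each segment [c, next_candle)
--   # with c; positions before the first candle keep -1.
--   candles = [i for i in range(n) if s[i] == '|']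
--   left = [-1] * n
--   for c, nxt in zip(candles, candles[1:] + [n]):
--     for j in range(c, nxt):
--       left[j] = c
--   return left
-- ===== Notes on version B (the rewrite author's own statement) =====
-- stated objective: alternative
-- what changed: B first extracts the list of candle indices and then fills each segment between consecutive candles with its left candle, instead of A's single carry scan over every position.
import Mathlib
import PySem

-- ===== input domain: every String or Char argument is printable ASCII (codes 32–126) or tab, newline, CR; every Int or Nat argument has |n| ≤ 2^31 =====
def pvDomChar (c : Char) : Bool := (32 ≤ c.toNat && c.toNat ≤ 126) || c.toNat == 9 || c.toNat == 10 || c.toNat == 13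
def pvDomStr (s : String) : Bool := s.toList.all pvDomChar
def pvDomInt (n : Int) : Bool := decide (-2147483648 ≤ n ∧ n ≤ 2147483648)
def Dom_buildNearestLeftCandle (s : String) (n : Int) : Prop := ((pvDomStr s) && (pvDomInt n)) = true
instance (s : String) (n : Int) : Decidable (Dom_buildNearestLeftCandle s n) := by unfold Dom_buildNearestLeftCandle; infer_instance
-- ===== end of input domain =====

-- B replaces A's carry scan by indexing the candle positions and filling each
-- segment between consecutive candles (objective: alternative decomposition, same cost).

-- ===== PORT A =====
-- literal transliteration of A: left = [-1]*n, then a carry scan over range(n);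
-- loop indices i are ≥ 0, so i.toNat is exact; the `none` branch of s[i]
-- (IndexError) is unreachable inside Pre_.
def buildNearestLeftCandle (s : String) (n : Int) : List Int :=
  let left := List.replicate n.toNat (-1 : Int)
  ((PySem.List.pyRange 0 n 1).foldl
    (fun (st : List Int × Int) i =>
      match PySem.Str.pyGet? s i with
      | some c => if c = '|' then (st.1.set i.toNat i, i) else (st.1.set i.toNat st.2, st.2)
      | none => st)
    (left, (-1 : Int))).1

-- ===== PORT B =====
-- literal transliteration of Source B: candles = [i for i in range(n) if s[i]=='|'],
-- then for (c, nxt) in zip(candles, candles[1:] + [n]) fill left[c:nxt] with c.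
def buildNearestLeftCandle_alt (s : String) (n : Int) : List Int :=
  let candles := (PySem.List.pyRange 0 n 1).filter (fun i => PySem.Str.pyGet? s i = some '|')
  let left := List.replicate n.toNat (-1 : Int)
  (candles.zip (PySem.List.slice candles (some 1) ++ [n])).foldl
    (fun l pr => (PySem.List.pyRange pr.1 pr.2 1).foldl (fun l' j => l'.set j.toNat pr.1) l)
    left

-- ===== PRECONDITION & SPEC =====
-- Pre_ excludes exactly the inputs where A raises IndexError: n > len(s)
-- (for n ≤ len(s), including n ≤ 0, A returns normally).
def Pre_buildNearestLeftCandle (s : String) (n : Int) : Prop := n ≤ (s.toList.length : Int)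
instance (s : String) (n : Int) : Decidable (Pre_buildNearestLeftCandle s n) := by unfold Pre_buildNearestLeftCandle; infer_instance
def pvWitness_buildNearestLeftCandle : String × Int := ("*|*|", 4)
def Spec_buildNearestLeftCandle (s : String) (n : Int) (out : List Int) : Prop := out = buildNearestLeftCandle_alt s n
instance (s : String) (n : Int) (out : List Int) : Decidable (Spec_buildNearestLeftCandle s n out) := by unfold Spec_buildNearestLeftCandle; infer_instance

-- ===== CLAIM (what is proved, stated in full; the proofs are below) =====
def Claim_equal_buildNearestLeftCandle : Prop := ∀ (s : String) (n : Int), Dom_buildNearestLeftCandle s n → Pre_buildNearestLeftCandle s n → Spec_buildNearestLeftCandle s n (buildNearestLeftCandle s n)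

-- ===== LEMMAS AND PROOFS =====

-- Nat-level models of the two loops (proof-only helpers).

/-- Value A's scan carries after processing indices [0, k): the nearest candle. -/
def nlF (cl : List Char) : Nat → Int
  | 0 => -1
  | k+1 => if cl.getD k ' ' = '|' then (k : Int) else nlF cl k

/-- A's loop body on Nat indices. -/
def stepA (cl : List Char) (st : List Int × Int) (k : Nat) : List Int × Int :=
  if cl.getD k ' ' = '|' then (st.1.set k (k : Int), (k : Int)) else (st.1.set k st.2, st.2)

/-- B's candle index list on Nat indices. -/
def candlesN (cl : List Char) (N : Nat) : List Nat :=
  (List.range N).filter (fun k => cl.getD k ' ' = '|')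

/-- B's inner fill loop: set positions [c, t) to c. -/
def fillN (l : List Int) (c t : Nat) : List Int :=
  (List.range (t - c)).foldl (fun l' k => l'.set (c + k) (c : Int)) l

/-- B's whole computation on Nat indices. -/
def bresN (cl : List Char) (N : Nat) : List Int :=
  ((candlesN cl N).zip ((candlesN cl N).drop 1 ++ [N])).foldl
    (fun l pr => fillN l pr.1 pr.2) (List.replicate N (-1))

lemma pyRange_nonpos {n : Int} (h : n ≤ 0) : PySem.List.pyRange 0 n 1 = [] := by
  simp [PySem.List.pyRange]; omega

lemma pyRange_cast (c t : Nat) :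
    PySem.List.pyRange (c : Int) (t : Int) 1
      = (List.range (t - c)).map (fun k => ((c + k : Nat) : Int)) := by
  simp only [PySem.List.pyRange, if_neg (by norm_num : ¬ (1:Int) = 0)]
  norm_num
  have h : (if c < t then t - c else 0) = t - c := by split <;> omega
  rw [h]

lemma foldl_set_length (g : Nat → Nat) (v : Int) :
    ∀ (js : List Nat) (l : List Int),
      (js.foldl (fun l' k => l'.set (g k) v) l).length = l.length := by
  intro js
  induction js with
  | nil => intro l; rfl
  | cons j js ih => intro l; simp [List.foldl_cons, ih, List.length_set]

lemma fillN_length (l : List Int) (c t : Nat) : (fillN l c t).length = l.length :=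
  foldl_set_length (fun k => c + k) (c : Int) _ l

lemma fills_length : ∀ (ps : List (Nat × Nat)) (l : List Int),
    (ps.foldl (fun l pr => fillN l pr.1 pr.2) l).length = l.length := by
  intro ps
  induction ps with
  | nil => intro l; rfl
  | cons p ps ih => intro l; simp [List.foldl_cons, ih, fillN_length]

lemma set_append_left (l : List Int) (x v : Int) {i : Nat} (h : i < l.length) :
    (l ++ [x]).set i v = l.set i v ++ [x] := by
  rw [List.set_append, if_pos h]

lemma set_append_last (l : List Int) (x v : Int) :
    (l ++ [x]).set l.length v = l ++ [v] := by
  rw [List.set_append, if_neg (by omega)]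
  simp

lemma foldl_set_append (g : Nat → Nat) (v x : Int) :
    ∀ (js : List Nat) (l : List Int), (∀ k ∈ js, g k < l.length) →
      (js.foldl (fun l' k => l'.set (g k) v) (l ++ [x]))
        = js.foldl (fun l' k => l'.set (g k) v) l ++ [x] := by
  intro js
  induction js with
  | nil => intro l _; rfl
  | cons j js ih =>
    intro l hb
    simp only [List.foldl_cons]
    rw [set_append_left l x v (hb j (List.mem_cons_self))]
    exact ih (l.set (g j) v) (by intro k hk; simp only [List.length_set]; exact hb k (List.mem_cons_of_mem _ hk))

lemma fillN_append (l : List Int) (x : Int) (c t : Nat) (h : t ≤ l.length) :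
    fillN (l ++ [x]) c t = fillN l c t ++ [x] := by
  apply foldl_set_append
  intro k hk
  have := List.mem_range.mp hk
  omega

lemma fills_append : ∀ (ps : List (Nat × Nat)) (l : List Int) (x : Int),
    (∀ pr ∈ ps, pr.2 ≤ l.length) →
      (ps.foldl (fun l pr => fillN l pr.1 pr.2) (l ++ [x]))
        = ps.foldl (fun l pr => fillN l pr.1 pr.2) l ++ [x] := by
  intro ps
  induction ps with
  | nil => intro l x _; rfl
  | cons p ps ih =>
    intro l x hb
    simp only [List.foldl_cons]
    rw [fillN_append l x p.1 p.2 (hb p (List.mem_cons_self))]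
    exact ih _ x (by intro pr hpr; rw [fillN_length]; exact hb pr (List.mem_cons_of_mem _ hpr))

lemma fillN_succ_last (l : List Int) (x : Int) (c N : Nat) (hc : c ≤ N) (hl : l.length = N) :
    fillN (l ++ [x]) c (N + 1) = fillN l c N ++ [(c : Int)] := by
  unfold fillN
  have h1 : N + 1 - c = (N - c) + 1 := by omega
  rw [h1, List.range_succ, List.foldl_append]
  have hb : ∀ k ∈ List.range (N - c), c + k < l.length := by
    intro k hk
    have hkr := List.mem_range.mp hk
    omega
  rw [foldl_set_append (fun k => c + k) (c : Int) x _ l hb]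
  simp only [List.foldl_cons, List.foldl_nil]
  have h2 : c + (N - c) = N := by omega
  rw [h2]
  have h3 : (List.foldl (fun l' k => l'.set (c + k) (c : Int)) l (List.range (N - c))).length = N := by
    rw [foldl_set_length]; exact hl
  calc (List.foldl (fun l' k => l'.set (c + k) (c:Int)) l (List.range (N - c)) ++ [x]).set N (c:Int)
      = (List.foldl (fun l' k => l'.set (c + k) (c:Int)) l (List.range (N - c)) ++ [x]).set
          (List.foldl (fun l' k => l'.set (c + k) (c:Int)) l (List.range (N - c))).length (c:Int) := by rw [h3]
    _ = _ := set_append_last _ x (c:Int)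

lemma zip_drop_concat : ∀ (xs : List Nat) (t : Nat),
    xs.zip (xs.drop 1 ++ [t]) = (xs ++ [t]).zip ((xs ++ [t]).drop 1) := by
  intro xs
  induction xs with
  | nil => intro t; rfl
  | cons a xs ih =>
    intro t
    cases xs with
    | nil => rfl
    | cons b r =>
      simp only [List.cons_append, List.drop_succ_cons, List.drop_zero, List.zip_cons_cons]
      have := ih t
      simp only [List.cons_append, List.drop_succ_cons, List.drop_zero] at this
      rw [this]

lemma cp_concat : ∀ (xs : List Nat) (t : Nat) (h : xs ≠ []),
    (xs ++ [t]).zip ((xs ++ [t]).drop 1)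
      = xs.zip (xs.drop 1) ++ [(xs.getLast h, t)] := by
  intro xs
  induction xs with
  | nil => intro t h; exact absurd rfl h
  | cons a xs ih =>
    intro t h
    cases xs with
    | nil => rfl
    | cons b r =>
      simp only [List.cons_append, List.drop_succ_cons, List.drop_zero, List.zip_cons_cons]
      have := ih t (by simp)
      simp only [List.cons_append, List.drop_succ_cons, List.drop_zero] at this
      rw [this]
      simp [List.getLast_cons]

lemma candles_lt {cl : List Char} {N : Nat} {x : Nat} (h : x ∈ candlesN cl N) : x < N := by
  unfold candlesN at h
  exact List.mem_range.mp (List.mem_of_mem_filter h)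

lemma candles_succ (cl : List Char) (N : Nat) :
    candlesN cl (N + 1)
      = candlesN cl N ++ (if cl.getD N ' ' = '|' then [N] else []) := by
  unfold candlesN
  rw [List.range_succ, List.filter_append]
  congr 1
  by_cases hp : cl.getD N ' ' = '|' <;>
    simp only [List.getD] at hp <;> simp [List.getD, hp]

lemma nlF_getLast (cl : List Char) : ∀ N : Nat,
    nlF cl N = (match (candlesN cl N).getLast? with
                | none => (-1 : Int)
                | some c => (c : Int)) := by
  intro N
  induction N with
  | zero => rfl
  | succ N ih =>
    unfold nlF
    rw [candles_succ]
    by_cases hp : cl.getD N ' ' = '|'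
    · rw [if_pos hp, if_pos hp, List.getLast?_concat]
    · rw [if_neg hp, if_neg hp, List.append_nil]
      exact ih

lemma amain (cl : List Char) : ∀ (N : Nat) (l : List Int), N ≤ l.length →
    List.foldl (stepA cl) (l, -1) (List.range N)
      = ((List.range N).map (fun i => nlF cl (i + 1)) ++ l.drop N, nlF cl N) := by
  intro N
  induction N with
  | zero => intro l _; simp [nlF]
  | succ N ih =>
    intro l hl
    rw [List.range_succ, List.foldl_append, ih l (by omega)]
    simp only [List.foldl_cons, List.foldl_nil]
    have hN : N < l.length := by omega
    have hdrop : l.drop N = l[N] :: l.drop (N + 1) := List.drop_eq_getElem_cons hN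
    have hmaplen : ((List.range N).map (fun i => nlF cl (i + 1))).length = N := by simp
    have hset : ∀ v : Int,
        ((List.range N).map (fun i => nlF cl (i + 1)) ++ l.drop N).set N v
          = (List.range N).map (fun i => nlF cl (i + 1)) ++ v :: l.drop (N + 1) := by
      intro v
      rw [hdrop, List.set_append, if_neg (by omega), hmaplen]
      rw [Nat.sub_self]
      rfl
    have hrange : (List.range (N+1)).map (fun i => nlF cl (i + 1))
        = (List.range N).map (fun i => nlF cl (i + 1)) ++ [nlF cl (N + 1)] := by
      rw [List.range_succ, List.map_append]; rfl
    unfold stepA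
    by_cases hp : cl.getD N ' ' = '|'
    · rw [if_pos hp]
      have h5 : nlF cl (N + 1) = (N : Int) := by unfold nlF; rw [if_pos hp]
      rw [hset ((N : Nat) : Int)]
      simp [List.map_append, h5]
    · rw [if_neg hp]
      have h5 : nlF cl (N + 1) = nlF cl N := by
        show (if cl.getD N ' ' = '|' then ((N : Nat) : Int) else nlF cl N) = nlF cl N
        exact if_neg hp
      rw [hset (nlF cl N)]
      simp [List.map_append, h5]

lemma nlF_neg (cl : List Char) : ∀ m : Nat, (∀ k, k < m → ¬ cl.getD k ' ' = '|') → nlF cl m = -1 := by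
  intro m
  induction m with
  | zero => intro _; rfl
  | succ m ih =>
    intro h
    unfold nlF
    rw [if_neg (h m (by omega))]
    exact ih (fun k hk => h k (by omega))

lemma pairs_snd_le (cl : List Char) (N : Nat) :
    ∀ pr ∈ (candlesN cl N).zip ((candlesN cl N).drop 1 ++ [N]), pr.2 ≤ N := by
  intro pr hpr
  have h2 := (List.of_mem_zip (by exact hpr : (pr.1, pr.2) ∈ _)).2
  rcases List.mem_append.mp h2 with h | h
  · exact le_of_lt (candles_lt (List.mem_of_mem_drop h))
  · simp at h; omega

lemma prefix_snd_le (cl : List Char) (N : Nat) :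
    ∀ pr ∈ (candlesN cl N).zip ((candlesN cl N).drop 1), pr.2 ≤ N := by
  intro pr hpr
  have h2 := (List.of_mem_zip (by exact hpr : (pr.1, pr.2) ∈ _)).2
  exact le_of_lt (candles_lt (List.mem_of_mem_drop h2))

lemma bmain (cl : List Char) : ∀ N : Nat,
    bresN cl N = (List.range N).map (fun i => nlF cl (i + 1)) := by
  intro N
  induction N with
  | zero => rfl
  | succ N ih =>
    have hrange : (List.range (N+1)).map (fun i => nlF cl (i + 1))
        = (List.range N).map (fun i => nlF cl (i + 1)) ++ [nlF cl (N + 1)] := by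
      rw [List.range_succ, List.map_append]; rfl
    rw [hrange]
    by_cases hp : cl.getD N ' ' = '|'
    · have hc1 : candlesN cl (N+1) = candlesN cl N ++ [N] := by
        rw [candles_succ, if_pos hp]
      have hpairs : (candlesN cl (N+1)).zip ((candlesN cl (N+1)).drop 1 ++ [N+1])
          = (candlesN cl N).zip ((candlesN cl N).drop 1 ++ [N]) ++ [(N, N+1)] := by
        rw [hc1, zip_drop_concat (candlesN cl N ++ [N]) (N+1),
            cp_concat (candlesN cl N ++ [N]) (N+1) (by simp), List.getLast_concat,
            ← zip_drop_concat (candlesN cl N) N]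
      unfold bresN
      rw [hpairs, List.foldl_append]
      simp only [List.foldl_cons, List.foldl_nil]
      rw [List.replicate_succ',
          fills_append _ _ _ (by
            intro pr hpr
            rw [List.length_replicate]
            exact pairs_snd_le cl N pr hpr)]
      have hlen : (List.foldl (fun l pr => fillN l pr.1 pr.2) (List.replicate N (-1))
          ((candlesN cl N).zip ((candlesN cl N).drop 1 ++ [N]))).length = N := by
        rw [fills_length, List.length_replicate]
      rw [fillN_succ_last _ _ N N (le_refl N) hlen]
      have h5 : nlF cl (N + 1) = (N : Int) := by unfold nlF; rw [if_pos hp]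
      have hfid : ∀ l : List Int, fillN l N N = l := by
        intro l; unfold fillN; rw [Nat.sub_self]; rfl
      rw [h5, hfid]
      exact congrArg (fun l => l ++ [((N : Nat) : Int)]) ih
    · have hc1 : candlesN cl (N+1) = candlesN cl N := by
        rw [candles_succ, if_neg hp, List.append_nil]
      have h5 : nlF cl (N + 1) = nlF cl N := by
        show (if cl.getD N ' ' = '|' then ((N : Nat) : Int) else nlF cl N) = nlF cl N
        exact if_neg hp
      rcases eq_or_ne (candlesN cl N) [] with hc | hc
      · have hnone : ∀ k, k < N + 1 → ¬ cl.getD k ' ' = '|' := by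
          intro k hk
          rcases Nat.lt_or_ge k N with h | h
          · intro hcontra
            have : k ∈ candlesN cl N := by
              unfold candlesN
              rw [List.mem_filter]
              refine ⟨List.mem_range.mpr h, ?_⟩
              simp only [List.getD] at hcontra
              simp [hcontra]
            rw [hc] at this
            exact absurd this (List.not_mem_nil)
          · have : k = N := by omega
            rw [this]; exact hp
        unfold bresN
        rw [hc1, hc]
        simp only [List.zip_nil_left, List.foldl_nil]
        rw [h5, nlF_neg cl N (fun k hk => hnone k (by omega)), ← ih]
        unfold bresN
        rw [hc]
        simp only [List.zip_nil_left, List.foldl_nil]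
        rw [List.replicate_succ']
      · have hlast := List.getLast_mem hc
        have hclt : (candlesN cl N).getLast hc < N := candles_lt hlast
        have hpairsN : (candlesN cl N).zip ((candlesN cl N).drop 1 ++ [N])
            = (candlesN cl N).zip ((candlesN cl N).drop 1)
              ++ [((candlesN cl N).getLast hc, N)] := by
          rw [zip_drop_concat (candlesN cl N) N, cp_concat (candlesN cl N) N hc]
        have hpairsS : (candlesN cl (N+1)).zip ((candlesN cl (N+1)).drop 1 ++ [N+1])
            = (candlesN cl N).zip ((candlesN cl N).drop 1)
              ++ [((candlesN cl N).getLast hc, N+1)] := by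
          rw [hc1, zip_drop_concat (candlesN cl N) (N+1), cp_concat (candlesN cl N) (N+1) hc]
        have hbres : bresN cl N
            = fillN (List.foldl (fun l pr => fillN l pr.1 pr.2) (List.replicate N (-1))
                ((candlesN cl N).zip ((candlesN cl N).drop 1)))
                ((candlesN cl N).getLast hc) N := by
          unfold bresN
          rw [hpairsN, List.foldl_append]
          simp only [List.foldl_cons, List.foldl_nil]
        have hlen : (List.foldl (fun l pr => fillN l pr.1 pr.2) (List.replicate N (-1))
            ((candlesN cl N).zip ((candlesN cl N).drop 1))).length = N := by
          rw [fills_length, List.length_replicate]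
        have h6 : nlF cl N = (((candlesN cl N).getLast hc : Nat) : Int) := by
          rw [nlF_getLast cl N, List.getLast?_eq_some_getLast hc]
        unfold bresN
        rw [hpairsS, List.foldl_append]
        simp only [List.foldl_cons, List.foldl_nil]
        rw [List.replicate_succ',
            fills_append _ _ _ (by
              intro pr hpr
              rw [List.length_replicate]
              exact prefix_snd_le cl N pr hpr),
            fillN_succ_last _ _ _ N (le_of_lt hclt) hlen,
            h5, h6, ← hbres, ih]

-- port A equals the Nat model
lemma aport_eq (s : String) (N : Nat) (hlen : N ≤ s.toList.length) :
    buildNearestLeftCandle s (N : Int)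
      = (List.range N).map (fun i => nlF s.toList (i + 1)) := by
  unfold buildNearestLeftCandle
  simp only [Int.toNat_natCast]
  rw [PySem.List.pyRange_zero_natCast, List.foldl_map]
  have hstep : List.foldl
      (fun (st : List Int × Int) (k : Nat) =>
        match PySem.Str.pyGet? s ((k : Nat) : Int) with
        | some c => if c = '|' then (st.1.set ((k : Nat) : Int).toNat ((k : Nat) : Int), ((k : Nat) : Int))
                    else (st.1.set ((k : Nat) : Int).toNat st.2, st.2)
        | none => st)
      (List.replicate N (-1), -1) (List.range N)
      = List.foldl (stepA s.toList) (List.replicate N (-1), -1) (List.range N) := by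
    apply PySem.List.foldl_congr_mem
    intro acc k hk
    have hkl : k < s.toList.length := lt_of_lt_of_le (List.mem_range.mp hk) hlen
    rw [PySem.Str.pyGet?_natCast, List.getElem?_eq_getElem hkl]
    unfold stepA
    rw [List.getD_eq_getElem s.toList ' ' hkl]
    simp only [Int.toNat_natCast]
  rw [hstep, amain s.toList N (List.replicate N (-1)) (by rw [List.length_replicate])]
  simp [List.drop_replicate]

-- port B equals the Nat model
lemma bport_eq (s : String) (N : Nat) (hlen : N ≤ s.toList.length) :
    buildNearestLeftCandle_alt s (N : Int) = bresN s.toList N := by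
  unfold buildNearestLeftCandle_alt
  simp only [Int.toNat_natCast]
  rw [PySem.List.pyRange_zero_natCast, List.filter_map]
  have hfc : List.filter
      ((fun i => decide (PySem.Str.pyGet? s i = some '|')) ∘ (fun k : Nat => (k : Int)))
      (List.range N) = candlesN s.toList N := by
    unfold candlesN
    apply List.filter_congr
    intro k hk
    have hkl : k < s.toList.length := lt_of_lt_of_le (List.mem_range.mp hk) hlen
    simp only [Function.comp_apply, PySem.Str.pyGet?_natCast, List.getElem?_eq_getElem hkl,
      List.getD_eq_getElem s.toList ' ' hkl]
    simp
  rw [hfc, PySem.List.slice_from _ (by norm_num : (0:Int) ≤ 1), Int.toNat_one,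
      ← List.map_drop]
  rw [show ([( (N : Nat) : Int)] : List Int) = List.map (fun k : Nat => (k : Int)) [N] from rfl,
      ← List.map_append, List.zip_map, List.foldl_map]
  have hstep : List.foldl
      (fun (l : List Int) (q : Int × Int) =>
        (PySem.List.pyRange q.1 q.2 1).foldl (fun l' j => l'.set j.toNat q.1) l)
      (List.replicate N (-1))
      (List.map (Prod.map (fun k : Nat => (k : Int)) (fun k : Nat => (k : Int)))
        ((candlesN s.toList N).zip ((candlesN s.toList N).drop 1 ++ [N])))
      = List.foldl (fun l pr => fillN l pr.1 pr.2) (List.replicate N (-1))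
          ((candlesN s.toList N).zip ((candlesN s.toList N).drop 1 ++ [N])) := by
    rw [List.foldl_map]
    apply PySem.List.foldl_congr_mem
    intro acc pr _
    simp only [Prod.map_fst, Prod.map_snd]
    rw [pyRange_cast pr.1 pr.2, List.foldl_map]
    unfold fillN
    simp only [Int.toNat_natCast]
  rw [List.foldl_map] at hstep
  rw [hstep]
  rfl

-- ===== VERDICT (by name: the statement is the Claim_ definition above) =====
theorem buildNearestLeftCandle_spec : Claim_equal_buildNearestLeftCandle := by
  intro s n hDom hPre
  unfold Spec_buildNearestLeftCandle
  by_cases hn : n ≤ 0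
  · have h0 : n.toNat = 0 := by omega
    simp [buildNearestLeftCandle, buildNearestLeftCandle_alt, pyRange_nonpos hn, h0]
  · have hN : n = ((n.toNat : Nat) : Int) := by omega
    have hlen : n.toNat ≤ s.toList.length := by
      unfold Pre_buildNearestLeftCandle at hPre; omega
    rw [hN, aport_eq s n.toNat hlen, bport_eq s n.toNat hlen, bmain]
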